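-- pv_equiv track=rewrite | github.com/hoongding/algorithm | Programmers-Algo_Study/1주차/기능개발.py | solution
-- ===== SOURCE A (Python) =====
-- from collections import Counter
--
-- def solution(progresses, speeds):
--     complete_days = []
--     for progress, speed in zip(progresses, speeds):
--         remain_per = 100 - progress
--         if remain_per % speed == 0:
--             complete_days.append(remain_per // speed)
--         else:
--             complete_days.append(remain_per // speed + 1)
--     for i in range(len(complete_days) - 1):
--         if complete_days[i] >= complete_days[i + 1]:
--             complete_days[i + 1] = complete_days[i]
--         else:
--             continue
--     result = Counter(complete_days)
--     answer = list(result.values())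
--     return answer
-- ===== SOURCE B (Python) =====
-- def solution(progresses, speeds):
--     days = [-((progress - 100) // speed) for progress, speed in zip(progresses, speeds)]
--     if not days:
--         return []
--     answer = []
--     leader = days[0]
--     count = 0
--     for d in days:
--         if d <= leader:
--             count += 1
--         else:
--             answer.append(count)
--             leader = d
--             count = 1
--     answer.append(count)
--     return answer
-- ===== Notes on version B (the rewrite author's own statement) =====
-- stated objective: simpler
-- what changed: Replaces the running-max mutation pass plus Counter with a single grouping pass that tracks the current leader day and group size, and computes each completion day by one ceiling division instead of a mod test with two branches; empty input returns [] before indexing.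
import Mathlib
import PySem

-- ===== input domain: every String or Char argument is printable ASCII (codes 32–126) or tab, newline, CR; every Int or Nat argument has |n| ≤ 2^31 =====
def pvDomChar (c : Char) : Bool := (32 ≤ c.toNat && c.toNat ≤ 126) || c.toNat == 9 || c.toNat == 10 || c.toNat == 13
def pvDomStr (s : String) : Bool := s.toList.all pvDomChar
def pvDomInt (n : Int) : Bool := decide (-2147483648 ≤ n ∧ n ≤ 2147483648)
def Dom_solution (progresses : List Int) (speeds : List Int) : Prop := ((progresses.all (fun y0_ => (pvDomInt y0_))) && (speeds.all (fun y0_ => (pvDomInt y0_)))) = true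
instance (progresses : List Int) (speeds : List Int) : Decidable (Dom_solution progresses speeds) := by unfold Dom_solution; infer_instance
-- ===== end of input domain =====

-- One honest line: B replaces A's running-max mutation pass + Counter with a single
-- leader/count grouping pass and a single ceiling division per task (objective: simpler).

-- ===== PORT A =====
def solution (progresses : List Int) (speeds : List Int) : List Int :=
  let complete_days := (progresses.zip speeds).foldl (fun acc ps =>
      let remain_per := 100 - ps.1
      if PySem.Int.mod remain_per ps.2 = 0 then acc ++ [PySem.Int.floordiv remain_per ps.2]
      else acc ++ [PySem.Int.floordiv remain_per ps.2 + 1]) []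
  let fixed := (PySem.List.pyRange 0 ((complete_days.length : Int) - 1) 1).foldl
      (fun acc i =>
        if PySem.List.pyGetD acc i 0 ≥ PySem.List.pyGetD acc (i + 1) 0
        then PySem.List.pySetD acc (i + 1) (PySem.List.pyGetD acc i 0)
        else acc) complete_days
  (PySem.Dict.counter fixed).values

-- ===== PORT B =====
def solution_alt (progresses : List Int) (speeds : List Int) : List Int :=
  let days := (progresses.zip speeds).map (fun ps => -(PySem.Int.floordiv (ps.1 - 100) ps.2))
  match days with
  | [] => []
  | d0 :: _ =>
    let st := days.foldl (fun (st : List Int × Int × Int) d =>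
        if d ≤ st.2.1 then (st.1, st.2.1, st.2.2 + 1) else (st.1 ++ [st.2.2], d, 1))
      ([], d0, 0)
    st.1 ++ [st.2.2]

-- ===== PRECONDITION & SPEC =====
-- Pre_ excludes exactly the inputs on which Python A raises ZeroDivisionError:
-- a speed of 0 among the pairs actually consumed by zip.
def Pre_solution (progresses : List Int) (speeds : List Int) : Prop :=
  ∀ ps ∈ progresses.zip speeds, ps.2 ≠ 0
instance (progresses : List Int) (speeds : List Int) : Decidable (Pre_solution progresses speeds) := by unfold Pre_solution; infer_instance

def pvWitness_solution : List Int × List Int := ([93, 30, 55], [1, 30, 5])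

def Spec_solution (progresses : List Int) (speeds : List Int) (out : List Int) : Prop := out = solution_alt progresses speeds
instance (progresses : List Int) (speeds : List Int) (out : List Int) : Decidable (Spec_solution progresses speeds out) := by unfold Spec_solution; infer_instance

-- ===== CLAIM (what is proved, stated in full; the proofs are below) =====
def Claim_equal_solution : Prop := ∀ (progresses : List Int) (speeds : List Int), Dom_solution progresses speeds → Pre_solution progresses speeds → Spec_solution progresses speeds (solution progresses speeds)

-- ===== LEMMAS AND PROOFS =====

lemma ceil_pos (r s : Int) (hs : 0 < s) :
    (if PySem.Int.mod r s = 0 then PySem.Int.floordiv r s else PySem.Int.floordiv r s + 1)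
      = -(PySem.Int.floordiv (-r) s) := by
  rw [eq_comm, PySem.Int.neg_floordiv_neg_eq_iff_of_pos hs]
  have h1 := PySem.Int.floordiv_mul_add_mod r s
  have h2 := PySem.Int.mod_nonneg r hs
  have h3 := PySem.Int.mod_lt r hs
  split_ifs with h
  · constructor <;> nlinarith
  · have h4 : 0 < PySem.Int.mod r s := lt_of_le_of_ne h2 (Ne.symm h)
    constructor <;> nlinarith

lemma ceil_eq (r s : Int) (hs : s ≠ 0) :
    (if PySem.Int.mod r s = 0 then PySem.Int.floordiv r s else PySem.Int.floordiv r s + 1)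
      = -(PySem.Int.floordiv (-r) s) := by
  rcases lt_or_gt_of_ne hs with h | h
  · have ht : 0 < -s := by omega
    have e1 : PySem.Int.mod r s = -(PySem.Int.mod (-r) (-s)) := by
      rw [← PySem.Int.mod_neg_neg (-r) (-s)]; simp
    have e2 : PySem.Int.floordiv r s = PySem.Int.floordiv (-r) (-s) := by
      rw [← PySem.Int.floordiv_neg_neg (-r) (-s)]; simp
    have e3 : PySem.Int.floordiv (-r) s = PySem.Int.floordiv r (-s) := by
      rw [← PySem.Int.floordiv_neg_neg r (-s)]; simp
    rw [e1, e2, e3]; simp only [neg_eq_zero]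
    have := ceil_pos (-r) (-s) ht
    simpa using this
  · exact ceil_pos r s h

lemma days_eq (l : List (Int × Int)) (acc : List Int) (h : ∀ ps ∈ l, ps.2 ≠ 0) :
    l.foldl (fun acc ps =>
      let remain_per := 100 - ps.1
      if PySem.Int.mod remain_per ps.2 = 0 then acc ++ [PySem.Int.floordiv remain_per ps.2]
      else acc ++ [PySem.Int.floordiv remain_per ps.2 + 1]) acc
    = acc ++ l.map (fun ps => -(PySem.Int.floordiv (ps.1 - 100) ps.2)) := by
  induction l generalizing acc with
  | nil => simp
  | cons ps l ih =>
    have hps : ps.2 ≠ 0 := h ps (by simp)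
    have hcv := ceil_eq (100 - ps.1) ps.2 hps
    have hneg : -(100 - ps.1) = ps.1 - 100 := by ring
    rw [hneg] at hcv
    simp only [List.foldl_cons, List.map_cons]
    rw [ih _ (fun q hq => h q (by simp [hq]))]
    split_ifs with hc
    · rw [if_pos hc] at hcv; rw [hcv]; simp
    · rw [if_neg hc] at hcv; rw [hcv]; simp

def goMax (m : Int) : List Int → List Int
  | [] => []
  | b :: t => (max m b) :: goMax (max m b) t

lemma fix_inv (t : List Int) : ∀ (p : List Int) (m : Int),
    (PySem.List.pyRange (p.length : Int) ((p.length : Int) + (t.length : Int)) 1).foldl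
      (fun acc i =>
        if PySem.List.pyGetD acc i 0 ≥ PySem.List.pyGetD acc (i + 1) 0
        then PySem.List.pySetD acc (i + 1) (PySem.List.pyGetD acc i 0)
        else acc) (p ++ m :: t)
    = p ++ m :: goMax m t := by
  induction t with
  | nil =>
    intro p m
    rw [PySem.List.pyRange_one_eq_nil (by simp)]
    simp [goMax]
  | cons b t ih =>
    intro p m
    rw [PySem.List.pyRange_one_cons (by simp only [List.length_cons]; push_cast; omega)]
    simp only [List.foldl_cons]
    have hget1 : PySem.List.pyGetD (p ++ m :: b :: t) (p.length : Int) 0 = m := by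
      rw [PySem.List.pyGetD_natCast]
      simp [List.getD_eq_getElem?_getD]
    have hcast : ((p.length : Int) + 1) = ((p.length + 1 : Nat) : Int) := by push_cast; ring
    have hget2 : PySem.List.pyGetD (p ++ m :: b :: t) ((p.length : Int) + 1) 0 = b := by
      rw [hcast, PySem.List.pyGetD_natCast]
      simp [List.getD_eq_getElem?_getD]
    rw [hget1, hget2]
    have hstep : (if m ≥ b
        then PySem.List.pySetD (p ++ m :: b :: t) ((p.length : Int) + 1) m
        else p ++ m :: b :: t) = (p ++ [m]) ++ (max m b) :: t := by
      split_ifs with hmb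
      · rw [hcast, PySem.List.pySetD_natCast]
        rw [show p ++ m :: b :: t = (p ++ [m]) ++ b :: t by simp]
        rw [List.set_append_right _ _ (by simp)]
        simp [max_eq_left hmb]
      · rw [show p ++ m :: b :: t = (p ++ [m]) ++ b :: t by simp]
        simp [max_eq_right (le_of_not_ge hmb)]
    rw [hstep]
    have hrange : PySem.List.pyRange ((p.length : Int) + 1)
        ((p.length : Int) + ((b :: t).length : Int)) 1
        = PySem.List.pyRange (((p ++ [m]).length : Int))
          (((p ++ [m]).length : Int) + (t.length : Int)) 1 := by
      congr 1; · simp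
      · simp only [List.length_append, List.length_cons, List.length_nil]; push_cast; ring
    rw [hrange, ih (p ++ [m]) (max m b)]
    simp [goMax]

def grpGo (m c : Int) : List Int → List Int
  | [] => [c]
  | b :: t => if b ≤ m then grpGo m (c + 1) t else c :: grpGo b 1 t

def bump (c : Int) : List Int → List Int
  | [] => []
  | x :: xs => (x + c) :: xs

lemma goMax_ge (t : List Int) : ∀ (m : Int), ∀ x ∈ goMax m t, m ≤ x := by
  induction t with
  | nil => intro m x hx; simp [goMax] at hx
  | cons b t ih =>
    intro m x hx
    simp only [goMax, List.mem_cons] at hx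
    rcases hx with rfl | hx
    · exact le_max_left _ _
    · exact le_trans (le_max_left _ _) (ih (max m b) x hx)

lemma grp_fold (t : List Int) : ∀ (ans : List Int) (m c : Int),
    (let st := t.foldl (fun (st : List Int × Int × Int) d =>
        if d ≤ st.2.1 then (st.1, st.2.1, st.2.2 + 1) else (st.1 ++ [st.2.2], d, 1)) (ans, m, c)
     st.1 ++ [st.2.2])
    = ans ++ grpGo m c t := by
  induction t with
  | nil => intro ans m c; simp [grpGo]
  | cons b t ih =>
    intro ans m c
    simp only [List.foldl_cons, grpGo]
    split_ifs with hb
    · exact ih ans m (c + 1)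
    · rw [ih (ans ++ [c]) b 1]; simp

lemma foldl_add_cons (T : List Int) : ∀ (s : List Int) (x : Int), x ∉ T →
    T.foldl PySem.Set.add (x :: s) = x :: T.foldl PySem.Set.add s := by
  induction T with
  | nil => intro s x _; rfl
  | cons y T ih =>
    intro s x hx
    have hxy : y ≠ x := fun h => hx (by simp [h])
    simp only [List.foldl_cons]
    have hadd : PySem.Set.add (x :: s) y = x :: PySem.Set.add s y := by
      rw [PySem.Set.add_eq_ite, PySem.Set.add_eq_ite]
      simp [List.mem_cons, hxy]
      split_ifs <;> simp
    rw [hadd, ih _ _ (fun h => hx (by simp [h]))]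

lemma ofList_cons_not_mem (m : Int) (T : List Int) (hm : m ∉ T) :
    PySem.Set.ofList (m :: T) = m :: PySem.Set.ofList T := by
  rw [PySem.Set.ofList_eq_foldl, PySem.Set.ofList_eq_foldl]
  simp only [List.foldl_cons]
  have : PySem.Set.add ([] : List Int) m = [m] := rfl
  rw [this, foldl_add_cons T [] m hm]

lemma ofList_cons_cons_self (m : Int) (X : List Int) :
    PySem.Set.ofList (m :: m :: X) = PySem.Set.ofList (m :: X) := by
  rw [PySem.Set.ofList_eq_foldl, PySem.Set.ofList_eq_foldl]
  simp only [List.foldl_cons]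
  congr 1
  exact PySem.Set.add_of_mem (by simp)

lemma bump_bump (a b : Int) (xs : List Int) : bump a (bump b xs) = bump (b + a) xs := by
  cases xs
  · simp [bump]
  · simp [bump]; ring

lemma bump_zero (xs : List Int) : bump 0 xs = xs := by
  cases xs <;> simp [bump]

lemma counter_go (t : List Int) : ∀ (m c : Int),
    bump c ((PySem.Set.ofList (m :: goMax m t)).map
        (fun k => ((m :: goMax m t).count k : Int)))
      = grpGo m (c + 1) t := by
  induction t with
  | nil =>
    intro m c
    have h1 : PySem.Set.ofList [m] = [m] := ofList_cons_not_mem m [] (by simp)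
    simp [goMax, grpGo, h1, bump]
    ring
  | cons b t ih =>
    intro m c
    by_cases hb : b ≤ m
    · have hmax : max m b = m := max_eq_left hb
      simp only [goMax, hmax]
      rw [ofList_cons_cons_self]
      have hnm : m ∉ (PySem.Set.ofList (goMax m t)).discard m := by
        intro h
        exact ((PySem.Set.mem_discard _ _ _).1 h).2 rfl
      have hmap : (PySem.Set.ofList (m :: goMax m t)).map
            (fun k => (((m :: m :: goMax m t).count k : Nat) : Int))
          = bump 1 ((PySem.Set.ofList (m :: goMax m t)).map
            (fun k => (((m :: goMax m t).count k : Nat) : Int))) := by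
        rw [PySem.Set.ofList_cons m (goMax m t)]
        simp only [List.map_cons, bump]
        congr 1
        · push_cast [List.count_cons_self]; ring
        · apply List.map_congr_left
          intro k hk
          have hkm : k ≠ m := ((PySem.Set.mem_discard _ _ _).1 hk).2
          simp [Ne.symm hkm]
      rw [hmap, bump_bump, show (1 : Int) + c = c + 1 from by ring, ih m (c + 1)]
      simp [grpGo, hb]
    · have hmax : max m b = b := max_eq_right (le_of_not_ge hb)
      simp only [goMax, hmax]
      have hmT : m ∉ b :: goMax b t := by
        intro h
        apply hb
        rcases List.mem_cons.1 h with rfl | h'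
        · exact le_refl _
        · exact goMax_ge t b m h'
      rw [ofList_cons_not_mem m _ hmT]
      simp only [List.map_cons]
      have hcm : (((m :: b :: goMax b t).count m : Nat) : Int) = 1 := by
        rw [List.count_cons_self, List.count_eq_zero_of_not_mem hmT]
        simp
      have htail : (PySem.Set.ofList (b :: goMax b t)).map
            (fun k => (((m :: b :: goMax b t).count k : Nat) : Int))
          = (PySem.Set.ofList (b :: goMax b t)).map
            (fun k => (((b :: goMax b t).count k : Nat) : Int)) := by
        apply List.map_congr_left
        intro k hk
        have hkT : k ∈ b :: goMax b t := (PySem.Set.mem_ofList _ _).1 hk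
        have hkm : k ≠ m := fun h => hmT (h ▸ hkT)
        simp [Ne.symm hkm]
      rw [hcm, htail]
      have hbase := ih b 0
      rw [bump_zero, zero_add] at hbase
      rw [hbase]
      simp [grpGo, hb, bump]
      ring_nf

lemma fix_inv_nil (t : List Int) (m : Int) :
    (PySem.List.pyRange 0 ((t.length : Int)) 1).foldl
      (fun acc i =>
        if PySem.List.pyGetD acc i 0 ≥ PySem.List.pyGetD acc (i + 1) 0
        then PySem.List.pySetD acc (i + 1) (PySem.List.pyGetD acc i 0)
        else acc) (m :: t)
    = m :: goMax m t := by
  simpa using fix_inv t [] m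

lemma values_counter (L : List Int) :
    (PySem.Dict.counter L).values
      = (PySem.Set.ofList L).map (fun k => ((L.count k : Nat) : Int)) := by
  simp only [PySem.Dict.values, PySem.Dict.items_counter, List.map_map]
  rfl

-- ===== VERDICT (by name: the statement is the Claim_ definition above) =====
theorem solution_spec : Claim_equal_solution := by
  intro progresses speeds _ hpre
  unfold Spec_solution solution solution_alt
  dsimp only
  rw [days_eq _ [] hpre, List.nil_append]
  cases hl : (progresses.zip speeds).map (fun ps => -(PySem.Int.floordiv (ps.1 - 100) ps.2)) with
  | nil =>
    rw [PySem.List.pyRange_one_eq_nil (by norm_num)]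
    rfl
  | cons d0 t =>
    have hlen : ((d0 :: t).length : Int) - 1 = (t.length : Int) := by
      simp
    rw [hlen, fix_inv_nil t d0, values_counter]
    have hgrp := counter_go t d0 0
    rw [zero_add, bump_zero] at hgrp
    rw [hgrp]
    simp only [List.foldl_cons, le_refl, if_pos]
    rw [show (0 : Int) + 1 = 1 from by ring]
    have hgf := grp_fold t [] d0 1
    dsimp only at hgf
    rw [List.nil_append] at hgf
    exact hgf.symm
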